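-- pv_equiv track=rewrite | github.com/WGabrielCode/Algorithms_DataStructures | Introduction_to_ComputerScience/Set_5_recurrsion/139.py | is_res
-- ===== SOURCE A (Python) =====
-- def is_res( x ) :
--     if x == 1 :
--         return True
--     if x % 2 == 0  :
--         return is_res( x//2 )
--     if x % 3 == 0 :
--         return is_res( x//3 )
--     if x % 5 == 0  :
--         return is_res( x//5 )
--     return False
-- ===== SOURCE B (Python) =====
-- def is_res(x):
--     for p in (2, 3, 5):
--         while x % p == 0:
--             x //= p
--     return x == 1
-- ===== Notes on version B (the rewrite author's own statement) =====
-- stated objective: simpler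
-- what changed: Replaces the one-division-per-call recursion with an iterative drain: for each prime p in (2,3,5) a while loop divides out all factors of p, then tests x == 1.
-- outside the precondition, e.g. on is_res(0): A raises RecursionError, B does not finish within the time limit
import Mathlib
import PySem

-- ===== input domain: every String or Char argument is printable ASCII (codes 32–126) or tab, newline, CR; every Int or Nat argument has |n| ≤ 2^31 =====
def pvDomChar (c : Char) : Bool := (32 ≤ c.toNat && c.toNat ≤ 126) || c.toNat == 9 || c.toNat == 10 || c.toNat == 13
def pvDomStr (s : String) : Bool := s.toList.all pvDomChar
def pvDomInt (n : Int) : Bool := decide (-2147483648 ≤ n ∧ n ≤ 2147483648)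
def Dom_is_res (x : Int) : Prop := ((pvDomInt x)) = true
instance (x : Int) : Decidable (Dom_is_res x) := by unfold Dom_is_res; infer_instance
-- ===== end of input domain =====

-- B is simpler: an iterative drain (for each prime p in (2,3,5), divide p out while it divides)
-- instead of A's one-division-per-call recursion; same True-iff-reduces-to-1 semantics.

-- ===== PORT A =====
-- A recurses once per division; at x = 0 the Python recursion never returns (RecursionError),
-- so the port carries a fuel guard (|x| + 1 divisions always suffice for x ≠ 0).
def pvResFuel : Nat → Int → Bool
  | 0, _ => false
  | f + 1, x =>
    if x = 1 then true
    else if PySem.Int.mod x 2 = 0 then pvResFuel f (PySem.Int.floordiv x 2)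
    else if PySem.Int.mod x 3 = 0 then pvResFuel f (PySem.Int.floordiv x 3)
    else if PySem.Int.mod x 5 = 0 then pvResFuel f (PySem.Int.floordiv x 5)
    else false

def is_res (x : Int) : Bool := pvResFuel (x.natAbs + 1) x

-- ===== PORT B =====
-- 'while x % p == 0: x //= p', fuel-guarded (|x| + 1 iterations suffice for x ≠ 0).
def pvDrain : Nat → Int → Int → Int
  | 0, _, x => x
  | f + 1, p, x =>
    if PySem.Int.mod x p = 0 then pvDrain f p (PySem.Int.floordiv x p) else x

def pvStage (p x : Int) : Int := pvDrain (x.natAbs + 1) p x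

-- the 'for p in (2, 3, 5)' loop, unrolled over the three fixed primes
def is_res_alt (x : Int) : Bool :=
  decide (pvStage 5 (pvStage 3 (pvStage 2 x)) = 1)

-- ===== PRECONDITION & SPEC =====
-- Pre_ excludes only x = 0, on which Python A recurses forever (RecursionError, no value)
-- and Python B loops forever.
def Pre_is_res (x : Int) : Prop := x ≠ 0
instance (x : Int) : Decidable (Pre_is_res x) := by unfold Pre_is_res; infer_instance

def pvWitness_is_res : Int := (360)

def Spec_is_res (x : Int) (out : Bool) : Prop := out = is_res_alt x
instance (x : Int) (out : Bool) : Decidable (Spec_is_res x out) := by unfold Spec_is_res; infer_instance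

-- ===== CLAIM (what is proved, stated in full; the proofs are below) =====
def Claim_equal_is_res : Prop := ∀ (x : Int), Dom_is_res x → Pre_is_res x → Spec_is_res x (is_res x)

-- ===== LEMMAS AND PROOFS =====

theorem pv_mod_pos (x b : Int) (hb : 0 < b) : PySem.Int.mod x b = x % b :=
  PySem.Int.mod_eq_emod_of_pos hb

theorem pv_div_pos (x b : Int) (hb : 0 < b) : PySem.Int.floordiv x b = x / b :=
  PySem.Int.floordiv_eq_ediv_of_pos hb

-- dividing a nonzero multiple of p ∈ {2,3,5} at least halves the absolute value
theorem pv_halve (x p : Int) (hp : p = 2 ∨ p = 3 ∨ p = 5) (hx : x ≠ 0)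
    (hm : PySem.Int.mod x p = 0) :
    2 * (x / p).natAbs ≤ x.natAbs ∧ x / p ≠ 0 ∧ 2 ≤ x.natAbs := by
  have hp0 : (0:Int) < p := by rcases hp with h|h|h <;> omega
  have hdvd : p ∣ x := (PySem.Int.mod_eq_zero_iff_dvd x p).mp hm
  rcases hp with h|h|h <;> subst h <;> omega

-- fuel irrelevance for the drain loop (any fuel ≥ |x| gives the same result), p ∈ {2,3,5}
theorem drain_fuel_irrel (n : Nat) :
    ∀ (x : Int) (p : Int) (f f' : Nat), (p = 2 ∨ p = 3 ∨ p = 5) → x ≠ 0 →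
      x.natAbs ≤ n → x.natAbs ≤ f → x.natAbs ≤ f' →
      pvDrain f p x = pvDrain f' p x := by
  induction n with
  | zero => intro x p f f' _ hx hn _ _; omega
  | succ n ih =>
    intro x p f f' hp hx hn hf hf'
    by_cases hm : PySem.Int.mod x p = 0
    · have hp0 : (0:Int) < p := by rcases hp with h|h|h <;> omega
      obtain ⟨hhalf, hne, h2x⟩ := pv_halve x p hp hx hm
      cases f with
      | zero => omega
      | succ a =>
        cases f' with
        | zero => omega
        | succ b =>
          simp only [pvDrain, hm, if_true, pv_div_pos x p hp0]
          exact ih (x / p) p a b hp hne (by omega) (by omega) (by omega)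
    · cases f <;> cases f' <;> simp [pvDrain, hm]

theorem stage_noop (p x : Int) (hm : PySem.Int.mod x p ≠ 0) : pvStage p x = x := by
  simp [pvStage, pvDrain, hm]

theorem stage_step (p x : Int) (hp : p = 2 ∨ p = 3 ∨ p = 5) (hx : x ≠ 0)
    (hm : PySem.Int.mod x p = 0) :
    pvStage p x = pvStage p (PySem.Int.floordiv x p) := by
  have hp0 : (0:Int) < p := by rcases hp with h|h|h <;> omega
  obtain ⟨hhalf, hne, h2x⟩ := pv_halve x p hp hx hm
  unfold pvStage
  rw [pv_div_pos x p hp0]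
  have h1 : pvDrain (x.natAbs + 1) p x = pvDrain x.natAbs p (x / p) := by
    simp only [pvDrain, hm, if_true, pv_div_pos x p hp0]
  rw [h1]
  exact drain_fuel_irrel x.natAbs (x / p) p x.natAbs ((x / p).natAbs + 1) hp hne
    (by omega) (by omega) (by omega)

-- fuel irrelevance for A's recursion
theorem res_fuel_irrel (n : Nat) :
    ∀ (x : Int) (f f' : Nat), x ≠ 0 → x.natAbs ≤ n → x.natAbs ≤ f + 1 → x.natAbs ≤ f' + 1 →
      pvResFuel (f + 1) x = pvResFuel (f' + 1) x := by
  induction n with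
  | zero => intro x f f' hx hn _ _; omega
  | succ n ih =>
    intro x f f' hx hn hf hf'
    simp only [pvResFuel]
    by_cases h1 : x = 1
    · rw [if_pos h1, if_pos h1]
    rw [if_neg h1, if_neg h1]
    have step : ∀ (p : Int), (p = 2 ∨ p = 3 ∨ p = 5) → PySem.Int.mod x p = 0 →
        pvResFuel f (PySem.Int.floordiv x p) = pvResFuel f' (PySem.Int.floordiv x p) := by
      intro p hp hm
      have hp0 : (0:Int) < p := by rcases hp with h|h|h <;> omega
      obtain ⟨hhalf, hne, h2x⟩ := pv_halve x p hp hx hm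
      rw [pv_div_pos x p hp0]
      cases f with
      | zero => omega
      | succ a =>
        cases f' with
        | zero => omega
        | succ b =>
          exact ih (x / p) a b hne (by omega) (by omega) (by omega)
    by_cases h2 : PySem.Int.mod x 2 = 0
    · rw [if_pos h2, if_pos h2]; exact step 2 (Or.inl rfl) h2
    rw [if_neg h2, if_neg h2]
    by_cases h3 : PySem.Int.mod x 3 = 0
    · rw [if_pos h3, if_pos h3]; exact step 3 (Or.inr (Or.inl rfl)) h3
    rw [if_neg h3, if_neg h3]
    by_cases h5 : PySem.Int.mod x 5 = 0
    · rw [if_pos h5, if_pos h5]; exact step 5 (Or.inr (Or.inr rfl)) h5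
    · rw [if_neg h5, if_neg h5]

theorem main_equiv (n : Nat) : ∀ (x : Int), x ≠ 0 → x.natAbs ≤ n → is_res x = is_res_alt x := by
  induction n with
  | zero => intro x hx hn; omega
  | succ n ih =>
    intro x hx hn
    by_cases h1 : x = 1
    · subst h1; decide
    have stepA : ∀ (p : Int), (p = 2 ∨ p = 3 ∨ p = 5) → PySem.Int.mod x p = 0 →
        pvResFuel x.natAbs (PySem.Int.floordiv x p) = is_res (PySem.Int.floordiv x p) := by
      intro p hp hm
      have hp0 : (0:Int) < p := by rcases hp with h|h|h <;> omega
      obtain ⟨hhalf, hne, h2x⟩ := pv_halve x p hp hx hm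
      rw [pv_div_pos x p hp0]
      unfold is_res
      cases hnn : x.natAbs with
      | zero => omega
      | succ g =>
        exact res_fuel_irrel (x / p).natAbs (x / p) g ((x / p).natAbs) hne
          (by omega) (by omega) (by omega)
    have ihdiv : ∀ (p : Int), (p = 2 ∨ p = 3 ∨ p = 5) → PySem.Int.mod x p = 0 →
        is_res (PySem.Int.floordiv x p) = is_res_alt (PySem.Int.floordiv x p) := by
      intro p hp hm
      have hp0 : (0:Int) < p := by rcases hp with h|h|h <;> omega
      obtain ⟨hhalf, hne, h2x⟩ := pv_halve x p hp hx hm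
      rw [pv_div_pos x p hp0]
      exact ih (x / p) hne (by omega)
    by_cases h2 : PySem.Int.mod x 2 = 0
    · have hA : is_res x = is_res (PySem.Int.floordiv x 2) := by
        unfold is_res
        simp only [pvResFuel]
        rw [if_neg h1, if_pos h2]
        exact stepA 2 (Or.inl rfl) h2
      have hB : is_res_alt x = is_res_alt (PySem.Int.floordiv x 2) := by
        unfold is_res_alt
        rw [stage_step 2 x (Or.inl rfl) hx h2]
      rw [hA, hB]
      exact ihdiv 2 (Or.inl rfl) h2
    by_cases h3 : PySem.Int.mod x 3 = 0
    · have hodd3 : PySem.Int.mod (PySem.Int.floordiv x 3) 2 ≠ 0 := by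
        rw [pv_mod_pos _ 2 (by norm_num), pv_div_pos x 3 (by norm_num)]
        rw [pv_mod_pos x 2 (by norm_num)] at h2
        have : (3:Int) ∣ x := (PySem.Int.mod_eq_zero_iff_dvd x 3).mp h3
        omega
      have hA : is_res x = is_res (PySem.Int.floordiv x 3) := by
        unfold is_res
        simp only [pvResFuel]
        rw [if_neg h1, if_neg h2, if_pos h3]
        exact stepA 3 (Or.inr (Or.inl rfl)) h3
      have hB : is_res_alt x = is_res_alt (PySem.Int.floordiv x 3) := by
        unfold is_res_alt
        rw [stage_noop 2 x h2, stage_step 3 x (Or.inr (Or.inl rfl)) hx h3,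
          stage_noop 2 _ hodd3]
      rw [hA, hB]
      exact ihdiv 3 (Or.inr (Or.inl rfl)) h3
    by_cases h5 : PySem.Int.mod x 5 = 0
    · have h5d : (5:Int) ∣ x := (PySem.Int.mod_eq_zero_iff_dvd x 5).mp h5
      have hodd5 : PySem.Int.mod (PySem.Int.floordiv x 5) 2 ≠ 0 := by
        rw [pv_mod_pos _ 2 (by norm_num), pv_div_pos x 5 (by norm_num)]
        rw [pv_mod_pos x 2 (by norm_num)] at h2
        omega
      have h3d5 : PySem.Int.mod (PySem.Int.floordiv x 5) 3 ≠ 0 := by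
        rw [pv_mod_pos _ 3 (by norm_num), pv_div_pos x 5 (by norm_num)]
        rw [pv_mod_pos x 3 (by norm_num)] at h3
        omega
      have hA : is_res x = is_res (PySem.Int.floordiv x 5) := by
        unfold is_res
        simp only [pvResFuel]
        rw [if_neg h1, if_neg h2, if_neg h3, if_pos h5]
        exact stepA 5 (Or.inr (Or.inr rfl)) h5
      have hB : is_res_alt x = is_res_alt (PySem.Int.floordiv x 5) := by
        unfold is_res_alt
        rw [stage_noop 2 x h2, stage_noop 3 x h3,
          stage_step 5 x (Or.inr (Or.inr rfl)) hx h5,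
          stage_noop 2 _ hodd5, stage_noop 3 _ h3d5]
      rw [hA, hB]
      exact ihdiv 5 (Or.inr (Or.inr rfl)) h5
    · have hA : is_res x = false := by
        unfold is_res
        simp only [pvResFuel]
        rw [if_neg h1, if_neg h2, if_neg h3, if_neg h5]
      have hB : is_res_alt x = false := by
        unfold is_res_alt
        rw [stage_noop 2 x h2, stage_noop 3 x h3, stage_noop 5 x h5]
        simp [h1]
      rw [hA, hB]

-- ===== VERDICT (by name: the statement is the Claim_ definition above) =====
theorem is_res_spec : Claim_equal_is_res := by
  intro x _ hpre
  unfold Spec_is_res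
  exact main_equiv x.natAbs x hpre (le_refl _)
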